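-- pv_equiv track=rewrite | github.com/IsaOmar7/Artificial-Intelligence | AI Snake/utils.py | squareness
-- ===== SOURCE A (Python) =====
-- def squareness(snake):
--     x_max, x_min, y_min, y_max = 0, 0, 0, 0
--     # getting the dominions of the snake
--     for s in snake:
--         x, y = s
--         if x < x_min:
--             x_min = x
--         if x > x_max:
--             x_max = x
--         if y < y_min:
--             y_min = y
--         if y > y_max:
--             y_max = y
--     return (x_max - x_min) * (y_min - y_max) - len(snake)
-- ===== SOURCE B (Python) =====
-- def squareness(snake):
--     # sort-then-endpoints: each axis's extreme values are the first and last
--     # elements of the sorted coordinate list, seeded with 0 like A's initial state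
--     xs = sorted([0] + [x for x, _ in snake])
--     ys = sorted([0] + [y for _, y in snake])
--     return (xs[-1] - xs[0]) * (ys[0] - ys[-1]) - len(snake)
-- ===== Notes on version B (the rewrite author's own statement) =====
-- stated objective: alternative
-- what changed: Replaces A's single fused scan maintaining four running extremes with a sort-then-endpoints algorithm: each axis's 0-seeded coordinate list is sorted and the bounding box is read off its first and last elements.
import Mathlib
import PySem

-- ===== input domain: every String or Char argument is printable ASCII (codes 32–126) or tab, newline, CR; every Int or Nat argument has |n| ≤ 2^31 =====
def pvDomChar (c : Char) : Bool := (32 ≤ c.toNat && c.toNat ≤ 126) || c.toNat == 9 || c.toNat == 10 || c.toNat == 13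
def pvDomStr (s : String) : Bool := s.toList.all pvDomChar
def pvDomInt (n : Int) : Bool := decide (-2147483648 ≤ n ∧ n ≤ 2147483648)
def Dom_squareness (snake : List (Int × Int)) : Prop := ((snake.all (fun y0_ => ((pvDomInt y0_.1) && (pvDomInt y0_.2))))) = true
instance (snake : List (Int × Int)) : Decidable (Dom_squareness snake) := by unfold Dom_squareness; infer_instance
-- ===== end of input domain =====

-- B replaces A's single fused scan over four running extremes with sort-then-endpoints:
-- each axis's 0-seeded coordinate list is sorted and the extremes are its first/last
-- elements (objective: alternative algorithm; not faster — sorting is O(n log n)).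

-- ===== PORT A =====
-- the loop body: update (x_max, x_min, y_min, y_max) for one segment s = (x, y)
def squarenessStep (acc : Int × Int × Int × Int) (s : Int × Int) : Int × Int × Int × Int :=
  let (xMax, xMin, yMin, yMax) := acc
  let (x, y) := s
  let xMin := if x < xMin then x else xMin
  let xMax := if x > xMax then x else xMax
  let yMin := if y < yMin then y else yMin
  let yMax := if y > yMax then y else yMax
  (xMax, xMin, yMin, yMax)

def squareness (snake : List (Int × Int)) : Int :=
  let st := snake.foldl squarenessStep (0, 0, 0, 0)
  let (xMax, xMin, yMin, yMax) := st
  (xMax - xMin) * (yMin - yMax) - (snake.length : Int)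

-- ===== PORT B =====
-- sorted([0] + coords); xs[0]/xs[-1] via pyGet? — the list is nonempty (it contains 0),
-- so the .getD 0 default is never taken
def squareness_alt (snake : List (Int × Int)) : Int :=
  let xs := PySem.List.sorted ((0 : Int) :: snake.map (fun p => p.1)) (fun v => v) false
  let ys := PySem.List.sorted ((0 : Int) :: snake.map (fun p => p.2)) (fun v => v) false
  let xMin := (PySem.List.pyGet? xs 0).getD 0
  let xMax := (PySem.List.pyGet? xs (-1)).getD 0
  let yMin := (PySem.List.pyGet? ys 0).getD 0
  let yMax := (PySem.List.pyGet? ys (-1)).getD 0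
  (xMax - xMin) * (yMin - yMax) - (snake.length : Int)

-- ===== PRECONDITION & SPEC =====
def Spec_squareness (snake : List (Int × Int)) (out : Int) : Prop := out = squareness_alt snake
instance (snake : List (Int × Int)) (out : Int) : Decidable (Spec_squareness snake out) := by unfold Spec_squareness; infer_instance

-- ===== CLAIM =====
def Claim_equal_squareness : Prop := ∀ (snake : List (Int × Int)), Dom_squareness snake → Spec_squareness snake (squareness snake)

-- ===== LEMMAS AND PROOFS =====

-- A's zero-seeded running min/max over xs is the least/greatest element of 0 :: xs
theorem foldl_min_mem (xs : List Int) (a : Int) : xs.foldl min a ∈ a :: xs := by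
  induction xs generalizing a with
  | nil => simp
  | cons b t ih =>
      simp only [List.foldl_cons]
      rcases List.mem_cons.mp (ih (min a b)) with h | h
      · rw [h]; rcases min_choice a b with h' | h' <;> simp [h']
      · simp [h]

theorem foldl_min_le (xs : List Int) (a : Int) : ∀ y ∈ a :: xs, xs.foldl min a ≤ y := by
  induction xs generalizing a with
  | nil => simp
  | cons b t ih =>
      intro y hy
      simp only [List.foldl_cons]
      rcases List.mem_cons.mp hy with rfl | hy'
      · exact le_trans (ih _ _ (List.mem_cons_self)) (min_le_left _ _)
      · rcases List.mem_cons.mp hy' with rfl | hy''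
        · exact le_trans (ih _ _ (List.mem_cons_self)) (min_le_right _ _)
        · exact ih _ _ (List.mem_cons_of_mem _ hy'')

theorem foldl_max_mem (xs : List Int) (a : Int) : xs.foldl max a ∈ a :: xs := by
  induction xs generalizing a with
  | nil => simp
  | cons b t ih =>
      simp only [List.foldl_cons]
      rcases List.mem_cons.mp (ih (max a b)) with h | h
      · rw [h]; rcases max_choice a b with h' | h' <;> simp [h']
      · simp [h]

theorem foldl_max_ge (xs : List Int) (a : Int) : ∀ y ∈ a :: xs, y ≤ xs.foldl max a := by
  induction xs generalizing a with
  | nil => simp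
  | cons b t ih =>
      intro y hy
      simp only [List.foldl_cons]
      rcases List.mem_cons.mp hy with rfl | hy'
      · exact le_trans (le_max_left _ _) (ih _ _ (List.mem_cons_self))
      · rcases List.mem_cons.mp hy' with rfl | hy''
        · exact le_trans (le_max_right _ _) (ih _ _ (List.mem_cons_self))
        · exact ih _ _ (List.mem_cons_of_mem _ hy'')

-- A's fused fold state is componentwise the four running extremes of the projections
theorem foldl_step_eq (snake : List (Int × Int)) (xM xm ym yM : Int) :
    snake.foldl squarenessStep (xM, xm, ym, yM) =
      ((snake.map (fun p => p.1)).foldl max xM,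
       (snake.map (fun p => p.1)).foldl min xm,
       (snake.map (fun p => p.2)).foldl min ym,
       (snake.map (fun p => p.2)).foldl max yM) := by
  induction snake generalizing xM xm ym yM with
  | nil => rfl
  | cons s t ih =>
      obtain ⟨x, y⟩ := s
      simp only [List.foldl_cons, List.map_cons, squarenessStep, ih]
      refine congrArg₂ _ ?_ (congrArg₂ _ ?_ (congrArg₂ _ ?_ ?_)) <;>
        (congr 1; simp only [max_def, min_def]; split_ifs <;> omega)

-- the first element of sorted(0 :: xs) is the zero-seeded running min of xs
theorem sorted_first_eq_min (xs : List Int) :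
    (PySem.List.pyGet? (PySem.List.sorted ((0 : Int) :: xs) (fun v => v) false) 0).getD 0
      = xs.foldl min 0 := by
  set l : List Int := (0 : Int) :: xs with hl
  set s : List Int := PySem.List.sorted l (fun v => v) false with hs
  have hperm : s.Perm l := PySem.List.sorted_perm l (fun v => v) false
  have hne : s ≠ [] := by
    intro h
    have := hperm.length_eq
    simp [h, hl] at this
  obtain ⟨m, t, hst⟩ := List.exists_cons_of_ne_nil hne
  have hget : (PySem.List.pyGet? s 0).getD 0 = m := by
    rw [hst]; simp [PySem.List.pyGet?, PySem.List.pyIdx?]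
  rw [hget]
  have hmmem : m ∈ l := hperm.mem_iff.mp (by rw [hst]; exact List.mem_cons_self)
  have hmle : ∀ y ∈ l, m ≤ y := by
    have := PySem.List.key_head_sorted_le (xs := l) (key := fun v => v) (m := m) (t := t)
      (by rw [← hs, hst])
    simpa using this
  have hfmem : xs.foldl min 0 ∈ l := foldl_min_mem xs 0
  have hfle : ∀ y ∈ l, xs.foldl min 0 ≤ y := foldl_min_le xs 0
  exact le_antisymm (hmle _ hfmem) (hfle _ hmmem)

-- the last element of sorted(0 :: xs) is the zero-seeded running max of xs
theorem sorted_last_eq_max (xs : List Int) :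
    (PySem.List.pyGet? (PySem.List.sorted ((0 : Int) :: xs) (fun v => v) false) (-1)).getD 0
      = xs.foldl max 0 := by
  set l : List Int := (0 : Int) :: xs with hl
  set s : List Int := PySem.List.sorted l (fun v => v) false with hs
  have hperm : s.Perm l := PySem.List.sorted_perm l (fun v => v) false
  have hlen : s.length = l.length := hperm.length_eq
  have hpos : 0 < s.length := by rw [hlen, hl]; simp
  have hget : (PySem.List.pyGet? s (-1)).getD 0 = s[s.length - 1]'(by omega) := by
    simp only [PySem.List.pyGet?, PySem.List.pyIdx?]
    rw [if_neg (by omega), if_pos (by omega)]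
    have h1 : s.length - (- (-1) : Int).toNat = s.length - 1 := by norm_num
    rw [h1]
    simp [List.getElem?_eq_getElem (show s.length - 1 < s.length by omega)]
  rw [hget]
  have hmmem : s[s.length - 1]'(by omega) ∈ l := hperm.mem_iff.mp (List.getElem_mem _)
  have hmge : ∀ y ∈ l, y ≤ s[s.length - 1]'(by omega) := by
    intro y hy
    obtain ⟨i, hi, hyi⟩ := List.mem_iff_getElem.mp (hperm.mem_iff.mpr hy)
    rw [← hyi]
    have := PySem.List.sorted_id_getElem_mono (xs := l) (p := i) (q := s.length - 1)
      (by omega) (by rw [← hs]; omega)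
    simpa [← hs] using this
  have hfmem : xs.foldl max 0 ∈ l := foldl_max_mem xs 0
  have hfge : ∀ y ∈ l, y ≤ xs.foldl max 0 := foldl_max_ge xs 0
  exact le_antisymm (hfge _ hmmem) (hmge _ hfmem)

-- ===== VERDICT =====
theorem squareness_spec : Claim_equal_squareness := by
  intro snake _
  unfold Spec_squareness
  simp only [squareness, squareness_alt, foldl_step_eq,
    sorted_first_eq_min, sorted_last_eq_max]
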